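-- pv_equiv track=rewrite | github.com/mil04/Python-tasks | matrix/matrix.py | linia
-- ===== SOURCE A (Python) =====
-- def linia(start, koniec):
--     start_x, start_y = start
--     koniec_x, koniec_y = koniec
--     if start_x > koniec_x:
--         return [(-x, y) for (x, y) in linia((-start_x, start_y), (-koniec_x, koniec_y))]
--     if start_y > koniec_y:
--         return [(x, -y) for (x, y) in linia((start_x, -start_y), (koniec_x, -koniec_y))]
--
--     px, py = start_x, start_y
--
--     wynik = [None] * (koniec_x - start_x + koniec_y - start_y + 1)
--     wynik[0] = (px, py)
--     pozycja = 1
--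
--     while px != koniec_x or py != koniec_y:
--         if (py - start_y) * (koniec_x - start_x) > (koniec_y - start_y) * (px - start_x) or py == koniec_y:
--             px += 1
--         else:
--             py += 1
--         wynik[pozycja] = (px, py)
--         pozycja += 1
--
--     return wynik
-- ===== SOURCE B (Python) =====
-- def linia(start, koniec):
--     sx0, sy0 = start
--     kx, ky = koniec
--     dx = abs(kx - sx0)
--     dy = abs(ky - sy0)
--     stx = 1 if kx > sx0 else -1
--     sty = 1 if ky > sy0 else -1
--     px, py = sx0, sy0
--     wynik = [(px, py)]
--     for _ in range(dx + dy):
--         if abs(py - sy0) * dx > dy * abs(px - sx0) or abs(py - sy0) == dy: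
--             px += stx
--         else:
--             py += sty
--         wynik.append((px, py))
--     return wynik
-- ===== Notes on version B (the rewrite author's own statement) =====
-- stated objective: simpler
-- what changed: Replaced A's reflection recursion (self-calls with coordinate sign flips and list-comprehension remapping) by a single non-recursive pass that computes step signs and absolute spans once and walks all four quadrants directly.
import Mathlib
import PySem

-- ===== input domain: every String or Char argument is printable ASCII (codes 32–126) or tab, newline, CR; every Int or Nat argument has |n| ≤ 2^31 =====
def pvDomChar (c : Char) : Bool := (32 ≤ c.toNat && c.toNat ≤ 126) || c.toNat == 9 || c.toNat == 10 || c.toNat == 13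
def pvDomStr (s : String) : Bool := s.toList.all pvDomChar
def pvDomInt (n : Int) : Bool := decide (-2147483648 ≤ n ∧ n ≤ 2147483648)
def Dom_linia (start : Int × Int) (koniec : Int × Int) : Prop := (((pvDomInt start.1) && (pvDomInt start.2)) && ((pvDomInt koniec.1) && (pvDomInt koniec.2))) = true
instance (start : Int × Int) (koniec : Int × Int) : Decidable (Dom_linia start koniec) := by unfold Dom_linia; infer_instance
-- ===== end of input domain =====

-- B replaces A's reflection recursion by one direct pass using step signs and absolute spans (objective: simpler).

-- ===== PORT A =====
-- A's while loop: runs while (px,py) ≠ koniec; the fuel is the preallocated list length minus 1,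
-- which is exactly the number of iterations the Python loop performs in the non-reflected case.
def liniaLoopA (sx0 sy0 kx ky : Int) (px py : Int) : Nat → List (Int × Int)
  | 0 => []
  | n + 1 =>
    if px = kx ∧ py = ky then []
    else
      let p' : Int × Int :=
        if (py - sy0) * (kx - sx0) > (ky - sy0) * (px - sx0) ∨ py = ky then (px + 1, py)
        else (px, py + 1)
      p' :: liniaLoopA sx0 sy0 kx ky p'.1 p'.2 n

def linia (start : Int × Int) (koniec : Int × Int) : List (Int × Int) :=
  let sx0 := start.1; let sy0 := start.2
  let kx := koniec.1; let ky := koniec.2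
  if _h1 : sx0 > kx then
    (linia (-sx0, sy0) (-kx, ky)).map (fun p => (-p.1, p.2))
  else if _h2 : sy0 > ky then
    (linia (sx0, -sy0) (kx, -ky)).map (fun p => (p.1, -p.2))
  else
    (sx0, sy0) :: liniaLoopA sx0 sy0 kx ky sx0 sy0 (kx - sx0 + (ky - sy0)).toNat
termination_by (if start.1 > koniec.1 then 1 else 0) + (if start.2 > koniec.2 then 1 else 0)
decreasing_by
  · split_ifs <;> omega
  · split_ifs <;> omega

-- ===== PORT B =====
-- B's for loop over range(dx+dy), appending one point per step.
def liniaLoopB (sx0 sy0 dx dy stx sty : Int) (px py : Int) : Nat → List (Int × Int)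
  | 0 => []
  | n + 1 =>
    let p' : Int × Int :=
      if |py - sy0| * dx > dy * |px - sx0| ∨ |py - sy0| = dy then (px + stx, py)
      else (px, py + sty)
    p' :: liniaLoopB sx0 sy0 dx dy stx sty p'.1 p'.2 n

def linia_alt (start : Int × Int) (koniec : Int × Int) : List (Int × Int) :=
  let sx0 := start.1; let sy0 := start.2
  let kx := koniec.1; let ky := koniec.2
  let dx := |kx - sx0|
  let dy := |ky - sy0|
  let stx : Int := if kx > sx0 then 1 else -1
  let sty : Int := if ky > sy0 then 1 else -1
  (sx0, sy0) :: liniaLoopB sx0 sy0 dx dy stx sty sx0 sy0 (dx + dy).toNat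

-- ===== PRECONDITION & SPEC =====
def Spec_linia (start : Int × Int) (koniec : Int × Int) (out : List (Int × Int)) : Prop := out = linia_alt start koniec
instance (start : Int × Int) (koniec : Int × Int) (out : List (Int × Int)) : Decidable (Spec_linia start koniec out) := by unfold Spec_linia; infer_instance

-- ===== CLAIM (what is proved, stated in full; the proofs are below) =====
def Claim_equal_linia : Prop := ∀ (start : Int × Int) (koniec : Int × Int), Dom_linia start koniec → Spec_linia start koniec (linia start koniec)

-- ===== LEMMAS AND PROOFS =====

-- In the non-reflected quadrant the two loops agree step for step.
theorem loopA_eq_loopB (sx0 sy0 kx ky : Int) (h1 : sx0 ≤ kx) (h2 : sy0 ≤ ky) :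
    ∀ (n : Nat) (px py : Int), sx0 ≤ px → px ≤ kx → sy0 ≤ py → py ≤ ky →
      (n : Int) = (kx - px) + (ky - py) →
      liniaLoopA sx0 sy0 kx ky px py n =
        liniaLoopB sx0 sy0 (kx - sx0) (ky - sy0)
          (if kx > sx0 then 1 else -1) (if ky > sy0 then 1 else -1) px py n := by
  intro n
  induction n with
  | zero => intro px py _ _ _ _ _; rfl
  | succ n ih =>
    intro px py hpx1 hpx2 hpy1 hpy2 hn
    have hne : ¬ (px = kx ∧ py = ky) := by omega
    have habs1 : |py - sy0| = py - sy0 := abs_of_nonneg (by omega)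
    have habs2 : |px - sx0| = px - sx0 := abs_of_nonneg (by omega)
    by_cases hc : (py - sy0) * (kx - sx0) > (ky - sy0) * (px - sx0) ∨ py = ky
    · -- x-step
      have hcB : |py - sy0| * (kx - sx0) > (ky - sy0) * |px - sx0| ∨ |py - sy0| = ky - sy0 := by
        rw [habs1, habs2]; omega
      have hlt : px < kx := by
        rcases hc with hc | hc
        · by_contra h
          have hpx : px = kx := by omega
          have : (py - sy0) * (kx - sx0) ≤ (ky - sy0) * (px - sx0) := by
            rw [hpx]
            exact mul_le_mul_of_nonneg_right (by omega) (by omega)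
          omega
        · omega
      simp only [liniaLoopA, liniaLoopB, if_neg hne, if_pos hc, if_pos hcB]
      have e : px + (if kx > sx0 then (1:Int) else -1) = px + 1 := by
        rw [if_pos (by omega : kx > sx0)]
      rw [e]
      exact congrArg _ (ih (px + 1) py (by omega) (by omega) hpy1 hpy2 (by omega))
    · -- y-step
      have hcB : ¬ (|py - sy0| * (kx - sx0) > (ky - sy0) * |px - sx0| ∨ |py - sy0| = ky - sy0) := by
        rw [habs1, habs2]; omega
      have hlt : py < ky := by omega
      simp only [liniaLoopA, liniaLoopB, if_neg hne, if_neg hc, if_neg hcB]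
      have e : py + (if ky > sy0 then (1:Int) else -1) = py + 1 := by
        rw [if_pos (by omega : ky > sy0)]
      rw [e]
      exact congrArg _ (ih px (py + 1) hpx1 hpx2 (by omega) (by omega) (by omega))

-- A (base case) = B in the quadrant with sx0 ≤ kx and sy0 ≤ ky.
theorem linia_eq_alt_base (sx0 sy0 kx ky : Int) (h1 : sx0 ≤ kx) (h2 : sy0 ≤ ky) :
    linia (sx0, sy0) (kx, ky) = linia_alt (sx0, sy0) (kx, ky) := by
  rw [linia]
  simp only [linia_alt, dif_neg (by omega : ¬ sx0 > kx), dif_neg (by omega : ¬ sy0 > ky)]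
  have hdx : |kx - sx0| = kx - sx0 := abs_of_nonneg (by omega)
  have hdy : |ky - sy0| = ky - sy0 := abs_of_nonneg (by omega)
  rw [hdx, hdy]
  exact congrArg _ (loopA_eq_loopB sx0 sy0 kx ky h1 h2 _ sx0 sy0 le_rfl h1 le_rfl h2 (by omega))

-- B's loop commutes with negating the x-axis (step sign negated).
theorem loopB_negx (sx0 sy0 dx dy stx sty : Int) :
    ∀ (n : Nat) (px py : Int),
      (liniaLoopB (-sx0) sy0 dx dy (-stx) sty (-px) py n).map (fun p => (-p.1, p.2)) =
        liniaLoopB sx0 sy0 dx dy stx sty px py n := by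
  intro n
  induction n with
  | zero => intro px py; rfl
  | succ n ih =>
    intro px py
    have habs : |(-px) - (-sx0)| = |px - sx0| := by
      rw [show (-px) - (-sx0) = -(px - sx0) by ring, abs_neg]
    by_cases hc : |py - sy0| * dx > dy * |px - sx0| ∨ |py - sy0| = dy
    · simp only [liniaLoopB, habs, if_pos hc, List.map_cons]
      rw [show -px + -stx = -(px + stx) by ring]
      exact congrArg₂ _ (by rw [neg_neg]) (ih (px + stx) py)
    · simp only [liniaLoopB, habs, if_neg hc, List.map_cons]
      exact congrArg₂ _ (by rw [neg_neg]) (ih px (py + sty))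

-- B's loop commutes with negating the y-axis (step sign negated).
theorem loopB_negy (sx0 sy0 dx dy stx sty : Int) :
    ∀ (n : Nat) (px py : Int),
      (liniaLoopB sx0 (-sy0) dx dy stx (-sty) px (-py) n).map (fun p => (p.1, -p.2)) =
        liniaLoopB sx0 sy0 dx dy stx sty px py n := by
  intro n
  induction n with
  | zero => intro px py; rfl
  | succ n ih =>
    intro px py
    have habs : |(-py) - (-sy0)| = |py - sy0| := by
      rw [show (-py) - (-sy0) = -(py - sy0) by ring, abs_neg]
    by_cases hc : |py - sy0| * dx > dy * |px - sx0| ∨ |py - sy0| = dy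
    · simp only [liniaLoopB, habs, if_pos hc, List.map_cons]
      exact congrArg₂ _ (by rw [neg_neg]) (ih (px + stx) py)
    · simp only [liniaLoopB, habs, if_neg hc, List.map_cons]
      rw [show -py + -sty = -(py + sty) by ring]
      exact congrArg₂ _ (by rw [neg_neg]) (ih px (py + sty))

-- B is symmetric under negating the x-coordinates, whenever sx0 ≠ kx.
theorem alt_negx (sx0 sy0 kx ky : Int) (h : sx0 ≠ kx) :
    (linia_alt (-sx0, sy0) (-kx, ky)).map (fun p => (-p.1, p.2)) = linia_alt (sx0, sy0) (kx, ky) := by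
  simp only [linia_alt]
  have hdx : |(-kx : Int) - (-sx0)| = |kx - sx0| := by
    rw [show (-kx : Int) - (-sx0) = -(kx - sx0) by ring, abs_neg]
  have hstx : (if (-kx : Int) > -sx0 then (1:Int) else -1)
      = -(if kx > sx0 then (1:Int) else -1) := by
    split_ifs <;> omega
  rw [hdx, hstx, List.map_cons]
  exact congrArg₂ _ (by rw [neg_neg]) (loopB_negx sx0 sy0 _ _ _ _ _ sx0 sy0)

-- B is symmetric under negating the y-coordinates, whenever sy0 ≠ ky.
theorem alt_negy (sx0 sy0 kx ky : Int) (h : sy0 ≠ ky) :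
    (linia_alt (sx0, -sy0) (kx, -ky)).map (fun p => (p.1, -p.2)) = linia_alt (sx0, sy0) (kx, ky) := by
  simp only [linia_alt]
  have hdy : |(-ky : Int) - (-sy0)| = |ky - sy0| := by
    rw [show (-ky : Int) - (-sy0) = -(ky - sy0) by ring, abs_neg]
  have hsty : (if (-ky : Int) > -sy0 then (1:Int) else -1)
      = -(if ky > sy0 then (1:Int) else -1) := by
    split_ifs <;> omega
  rw [hdy, hsty, List.map_cons]
  exact congrArg₂ _ (by rw [neg_neg]) (loopB_negy sx0 sy0 _ _ _ _ _ sx0 sy0)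

theorem linia_eq_alt (sx0 sy0 kx ky : Int) :
    linia (sx0, sy0) (kx, ky) = linia_alt (sx0, sy0) (kx, ky) := by
  by_cases hx : sx0 > kx
  · by_cases hy : sy0 > ky
    · rw [linia]
      simp only [dif_pos hx]
      rw [linia]
      simp only [dif_neg (by omega : ¬ (-sx0 : Int) > -kx), dif_pos (by omega : sy0 > ky)]
      rw [linia_eq_alt_base (-sx0) (-sy0) (-kx) (-ky) (by omega) (by omega),
        alt_negy (-sx0) sy0 (-kx) ky (by omega), alt_negx sx0 sy0 kx ky (by omega)]
    · rw [linia]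
      simp only [dif_pos hx]
      rw [linia_eq_alt_base (-sx0) sy0 (-kx) ky (by omega) (by omega),
        alt_negx sx0 sy0 kx ky (by omega)]
  · by_cases hy : sy0 > ky
    · rw [linia]
      simp only [dif_neg hx, dif_pos hy]
      rw [linia_eq_alt_base sx0 (-sy0) kx (-ky) (by omega) (by omega),
        alt_negy sx0 sy0 kx ky (by omega)]
    · exact linia_eq_alt_base sx0 sy0 kx ky (by omega) (by omega)

-- ===== VERDICT (by name: the statement is the Claim_ definition above) =====
theorem linia_spec : Claim_equal_linia := by
  intro start koniec _
  unfold Spec_linia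
  obtain ⟨sx0, sy0⟩ := start
  obtain ⟨kx, ky⟩ := koniec
  exact linia_eq_alt sx0 sy0 kx ky
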